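-- pv_equiv track=rewrite | github.com/AlexSzatmary/advent-of-code-2024 | day-23/run_23.py | parse
-- ===== SOURCE A (Python) =====
-- from collections import defaultdict
--
-- def parse(lines: list[str]) -> defaultdict[str, list[str]]:
--     """
--     Given input file of pairs, creates network
--
--     Parameters
--     ----------
--     lines : text of input file as list of strings
--
--     Returns
--     -------
--     network : default dict giving list of connected nodes for a given node. The network
--         is actually undirected but is represented here as a DAG for later purposes,
--         with the "parent" in each pair being the one that is first alphabetically.
--     """
--     network = defaultdict(list)
--     for line in lines:
--         a = line[0:2]
--         b = line[3:5]
--         if b < a: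
--             a, b = b, a
--         network[a].append(b)
--     for node, children in network.items():
--         network[node] = sorted(children)
--     return network
-- ===== SOURCE B (Python) =====
-- def _normalize(line):
--     a = line[0:2]
--     b = line[3:5]
--     return (b, a) if b < a else (a, b)
--
--
-- def parse(lines):
--     pairs = [_normalize(line) for line in lines]
--     network = {}
--     for a, _ in pairs:
--         network.setdefault(a, [])
--     for a, b in sorted(pairs, key=lambda p: p[1]):
--         network[a].append(b)
--     return network
-- ===== Notes on version B (the rewrite author's own statement) =====
-- stated objective: alternative
-- what changed: B normalises all pairs, does one global stable sort of the pairs by neighbour and then groups them into the dict (keys pre-seeded in first-appearance order), instead of A's append-everything-then-sort-each-adjacency-list second pass.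
import Mathlib
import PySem

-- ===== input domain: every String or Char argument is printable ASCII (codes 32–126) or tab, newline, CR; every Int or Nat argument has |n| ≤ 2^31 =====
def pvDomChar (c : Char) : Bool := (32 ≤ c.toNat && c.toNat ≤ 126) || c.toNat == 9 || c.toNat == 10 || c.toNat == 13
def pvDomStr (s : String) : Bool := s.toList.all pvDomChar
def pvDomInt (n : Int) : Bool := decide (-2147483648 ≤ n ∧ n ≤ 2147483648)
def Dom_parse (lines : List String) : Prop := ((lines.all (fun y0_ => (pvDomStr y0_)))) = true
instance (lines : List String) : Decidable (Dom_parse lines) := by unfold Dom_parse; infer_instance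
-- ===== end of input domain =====

-- B replaces A's per-key build-then-sort (append each edge, then sort every adjacency list) by one
-- global stable sort of all normalised pairs by neighbour followed by grouping; equal return values,
-- 'alternative' objective, no speed claim.

-- ===== PORT A =====
def parse (lines : List String) : List (String × List String) :=
  let network : PySem.Dict String (List String) :=
    lines.foldl (fun network line =>
      let a := PySem.Str.slice line (some 0) (some 2)
      let b := PySem.Str.slice line (some 3) (some 5)
      let ab := if b < a then (b, a) else (a, b)
      network.modify ab.1 [] (· ++ [ab.2])) PySem.Dict.empty
  let network2 :=
    network.items.foldl (fun d p =>
      d.insert p.1 (PySem.List.sorted p.2 (fun x => x))) network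
  network2.items

-- ===== PORT B =====
def normLine (line : String) : String × String :=
  let a := PySem.Str.slice line (some 0) (some 2)
  let b := PySem.Str.slice line (some 3) (some 5)
  if b < a then (b, a) else (a, b)

def parse_alt (lines : List String) : List (String × List String) :=
  let pairs := lines.map normLine
  let network : PySem.Dict String (List String) :=
    pairs.foldl (fun d p => d.setdefault p.1 []) PySem.Dict.empty
  -- network[a].append(b): every key is present after the setdefault pass, so modify's default [] is never used
  let network2 :=
    (PySem.List.sorted pairs (fun p => p.2)).foldl
      (fun d p => d.modify p.1 [] (· ++ [p.2])) network
  network2.items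

-- ===== PRECONDITION & SPEC =====
def Spec_parse (lines : List String) (out : List (String × List String)) : Prop := out = parse_alt lines
instance (lines : List String) (out : List (String × List String)) : Decidable (Spec_parse lines out) := by unfold Spec_parse; infer_instance

-- ===== CLAIM (what is proved, stated in full; the proofs are below) =====
def Claim_equal_parse : Prop := ∀ (lines : List String), Dom_parse lines → Spec_parse lines (parse lines)

-- ===== LEMMAS AND PROOFS =====

-- A's first loop as a fold over the normalised pairs
def foldA (P : List (String × String)) (d : PySem.Dict String (List String)) : PySem.Dict String (List String) :=
  P.foldl (fun d p => d.modify p.1 [] (· ++ [p.2])) d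

def sortS (l : List String) : List String := PySem.List.sorted l (fun x => x)

theorem parse_eq_folds (lines : List String) :
    parse lines = ((foldA (lines.map normLine) PySem.Dict.empty).items.foldl
      (fun d p => d.insert p.1 (sortS p.2)) (foldA (lines.map normLine) PySem.Dict.empty)).items := by
  simp [parse, foldA, sortS, normLine, List.foldl_map]

-- sorted xs ++ [x] steps by one insertBy (stable insertion sort from the right)
theorem sorted_snd_snoc (xs : List (String × String)) (x : String × String) :
    PySem.List.sorted (xs ++ [x]) (fun p => p.2)
      = PySem.List.insertBy (fun a b => decide (a.2 < b.2)) x (PySem.List.sorted xs (fun p => p.2)) := by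
  rw [PySem.List.sorted_eq_foldl_insertBy (xs ++ [x]) (fun p => p.2),
    PySem.List.sorted_eq_foldl_insertBy xs (fun p => p.2), List.foldl_append]
  rfl

theorem sortS_snoc (l : List String) (b : String) :
    sortS (l ++ [b]) = PySem.List.insertBy (fun a b => decide (a < b)) b (sortS l) := by
  rw [sortS, sortS, PySem.List.sorted_eq_foldl_insertBy (l ++ [b]) (fun x => x),
    PySem.List.sorted_eq_foldl_insertBy l (fun x => x), List.foldl_append]
  rfl

theorem insertBy_of_forall_lt (x : String × String) (l : List (String × String))
    (h : ∀ z ∈ l, x.2 < z.2) :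
    PySem.List.insertBy (fun a b => decide (a.2 < b.2)) x l = x :: l := by
  cases l with
  | nil => rfl
  | cons y t => simp [PySem.List.insertBy, h y (by simp)]

theorem filter_insertBy (c : String) (x : String × String) :
    ∀ (s : List (String × String)), s.Pairwise (fun a b => a.2 ≤ b.2) →
      (PySem.List.insertBy (fun a b => decide (a.2 < b.2)) x s).filter (fun p => p.1 == c)
        = if x.1 == c then
            PySem.List.insertBy (fun a b => decide (a.2 < b.2)) x (s.filter (fun p => p.1 == c))
          else s.filter (fun p => p.1 == c) := by
  intro s
  induction s with
  | nil => intro _; by_cases hx : x.1 = c <;> simp [PySem.List.insertBy, hx]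
  | cons y t ih =>
    intro hp
    have hyall : ∀ z ∈ t, y.2 ≤ z.2 := (List.pairwise_cons.mp hp).1
    have hpt : t.Pairwise (fun a b => a.2 ≤ b.2) := (List.pairwise_cons.mp hp).2
    by_cases h : x.2 < y.2
    · have hstep : PySem.List.insertBy (fun a b => decide (a.2 < b.2)) x (y :: t) = x :: y :: t := by
        simp [PySem.List.insertBy, h]
      rw [hstep]
      by_cases hx : x.1 = c
      · have hkept : ∀ z ∈ (y :: t).filter (fun p => p.1 == c), x.2 < z.2 := by
          intro z hz
          have hzmem : z ∈ y :: t := List.mem_of_mem_filter hz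
          rcases List.mem_cons.mp hzmem with rfl | hzt
          · exact h
          · exact lt_of_lt_of_le h (hyall z hzt)
        rw [if_pos (by simpa using hx), insertBy_of_forall_lt x _ hkept]
        simp [hx]
      · rw [if_neg (by simpa using hx)]
        simp [hx]
    · have hstep : PySem.List.insertBy (fun a b => decide (a.2 < b.2)) x (y :: t)
          = y :: PySem.List.insertBy (fun a b => decide (a.2 < b.2)) x t := by
        simp [PySem.List.insertBy, h]
      rw [hstep]
      by_cases hy : y.1 = c
      · simp only [List.filter_cons, if_pos (by simpa using hy : ((y.1 == c) = true))]
        rw [ih hpt]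
        by_cases hx : x.1 = c
        · rw [if_pos (by simpa using hx), if_pos (by simpa using hx)]
          have : PySem.List.insertBy (fun a b => decide (a.2 < b.2)) x
              (y :: t.filter (fun p => p.1 == c))
              = y :: PySem.List.insertBy (fun a b => decide (a.2 < b.2)) x
                  (t.filter (fun p => p.1 == c)) := by
            simp [PySem.List.insertBy, h]
          rw [this]
        · rw [if_neg (by simpa using hx), if_neg (by simpa using hx)]
      · simp only [List.filter_cons, if_neg (by simpa using hy : ¬ ((y.1 == c) = true))]
        rw [ih hpt]

theorem filter_sorted_snd (c : String) :
    ∀ (xs : List (String × String)),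
      (PySem.List.sorted xs (fun p => p.2)).filter (fun p => p.1 == c)
        = PySem.List.sorted (xs.filter (fun p => p.1 == c)) (fun p => p.2) := by
  intro xs
  induction xs using List.reverseRecOn with
  | nil =>
    rw [PySem.List.sorted_eq_foldl_insertBy ([] : List (String × String)) (fun p => p.2)]
    rfl
  | append_singleton xs x ih =>
    rw [sorted_snd_snoc,
      filter_insertBy c x _ (PySem.List.sorted_pairwise xs (fun p => p.2)), ih,
      List.filter_append]
    by_cases hx : x.1 = c
    · rw [if_pos (by simpa using hx)]
      have : ((([x] : List (String × String))).filter (fun p => p.1 == c)) = [x] := by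
        simp [hx]
      rw [this, sorted_snd_snoc]
    · rw [if_neg (by simpa using hx)]
      have : ((([x] : List (String × String))).filter (fun p => p.1 == c)) = [] := by
        simp [hx]
      rw [this, List.append_nil]

theorem map_snd_insertBy (x : String × String) :
    ∀ (s : List (String × String)),
      (PySem.List.insertBy (fun a b => decide (a.2 < b.2)) x s).map (fun p => p.2)
        = PySem.List.insertBy (fun a b => decide (a < b)) x.2 (s.map (fun p => p.2)) := by
  intro s
  induction s with
  | nil => rfl
  | cons y t ih =>
    by_cases h : x.2 < y.2
    · have h1 : PySem.List.insertBy (fun a b => decide (a.2 < b.2)) x (y :: t) = x :: y :: t := by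
        simp [PySem.List.insertBy, h]
      have h2 : PySem.List.insertBy (fun a b => decide (a < b)) x.2 (y.2 :: t.map (fun p => p.2))
          = x.2 :: y.2 :: t.map (fun p => p.2) := by
        simp [PySem.List.insertBy, h]
      rw [h1]
      simp only [List.map_cons]
      rw [h2]
    · have h1 : PySem.List.insertBy (fun a b => decide (a.2 < b.2)) x (y :: t)
          = y :: PySem.List.insertBy (fun a b => decide (a.2 < b.2)) x t := by
        simp [PySem.List.insertBy, h]
      have h2 : PySem.List.insertBy (fun a b => decide (a < b)) x.2 (y.2 :: t.map (fun p => p.2))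
          = y.2 :: PySem.List.insertBy (fun a b => decide (a < b)) x.2 (t.map (fun p => p.2)) := by
        simp [PySem.List.insertBy, h]
      rw [h1]
      simp only [List.map_cons]
      rw [ih, h2]

theorem map_snd_sorted (xs : List (String × String)) :
    (PySem.List.sorted xs (fun p => p.2)).map (fun p => p.2) = sortS (xs.map (fun p => p.2)) := by
  induction xs using List.reverseRecOn with
  | nil =>
    rw [PySem.List.sorted_eq_foldl_insertBy ([] : List (String × String)) (fun p => p.2)]
    rfl
  | append_singleton xs x ih =>
    rw [sorted_snd_snoc, map_snd_insertBy, ih, List.map_append, ← sortS_snoc]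
    rfl

theorem parse_alt_eq (lines : List String) :
    parse_alt lines = ((PySem.List.sorted (lines.map normLine) (fun p => p.2)).foldl
      (fun d p => d.modify p.1 [] (· ++ [p.2]))
      ((lines.map normLine).foldl (fun d p => d.setdefault p.1 ([] : List String))
        PySem.Dict.empty)).items := rfl

-- setdefault pass: keys and values
theorem keys_setdefault (d : PySem.Dict String (List String)) (k : String) :
    (d.setdefault k ([] : List String)).keys = PySem.Set.add d.keys k := by
  by_cases h : d.contains k = true
  · rw [PySem.Dict.setdefault_of_contains _ _ h,
      PySem.Set.add_of_mem ((PySem.Dict.contains_iff_mem_keys _ _).mp h)]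
  · have h' : d.contains k = false := by simpa using h
    rw [PySem.Dict.setdefault_of_not_contains _ _ h',
      PySem.Dict.keys_insert_of_not_contains _ _ h',
      PySem.Set.add_of_not_mem (fun hm => h ((PySem.Dict.contains_iff_mem_keys _ _).mpr hm))]

theorem keys_foldl_setdefault :
    ∀ (l : List (String × String)) (d : PySem.Dict String (List String)),
      (l.foldl (fun d p => d.setdefault p.1 ([] : List String)) d).keys
        = PySem.Set.update d.keys (l.map (·.1)) := by
  intro l
  induction l with
  | nil => intro d; rfl
  | cons p t ih =>
    intro d
    rw [List.foldl_cons, ih, keys_setdefault, List.map_cons, PySem.Set.update_cons]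

theorem getD_setdefault (d : PySem.Dict String (List String)) (k c : String) :
    (d.setdefault k ([] : List String)).getD c [] = d.getD c [] := by
  by_cases h : d.contains k = true
  · rw [PySem.Dict.setdefault_of_contains _ _ h]
  · have h' : d.contains k = false := by simpa using h
    rw [PySem.Dict.setdefault_of_not_contains _ _ h']
    by_cases hc : c = k
    · subst hc
      rw [PySem.Dict.getD_insert_self, PySem.Dict.getD_of_not_contains _ _ h']
    · rw [PySem.Dict.getD_insert_of_ne _ _ _ hc]

theorem getD_foldl_setdefault :
    ∀ (l : List (String × String)) (d : PySem.Dict String (List String)) (c : String),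
      (l.foldl (fun d p => d.setdefault p.1 ([] : List String)) d).getD c [] = d.getD c [] := by
  intro l
  induction l with
  | nil => intro d c; rfl
  | cons p t ih => intro d c; rw [List.foldl_cons, ih, getD_setdefault]

-- untouched keys keep their value through A's re-insertion loop
theorem getD_foldl_insert_of_not_mem (g : List String → List String) :
    ∀ (l : List (String × List String)) (d : PySem.Dict String (List String)) (c : String),
      c ∉ l.map (·.1) →
      (l.foldl (fun d p => d.insert p.1 (g p.2)) d).getD c [] = d.getD c [] := by
  intro l
  induction l with
  | nil => intro d c _; rfl
  | cons p t ih =>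
    intro d c hc
    simp only [List.map_cons, List.mem_cons, not_or] at hc
    rw [List.foldl_cons, ih _ _ hc.2, PySem.Dict.getD_insert_of_ne _ _ _ hc.1]

theorem getD_foldl_insert_of_mem (g : List String → List String) :
    ∀ (l : List (String × List String)) (d : PySem.Dict String (List String)) (c : String)
      (v : List String), (l.map (·.1)).Nodup → (c, v) ∈ l →
      (l.foldl (fun d p => d.insert p.1 (g p.2)) d).getD c [] = g v := by
  intro l
  induction l with
  | nil => intro d c v _ hmem; cases hmem
  | cons p t ih =>
    intro d c v hnd hmem
    simp only [List.map_cons, List.nodup_cons] at hnd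
    rcases List.mem_cons.mp hmem with h | h
    · have hc : c = p.1 := congrArg Prod.fst h
      have hv : v = p.2 := congrArg Prod.snd h
      subst hc hv
      rw [List.foldl_cons,
        getD_foldl_insert_of_not_mem g t _ _ hnd.1, PySem.Dict.getD_insert_self]
    · exact ih _ _ _ hnd.2 h

theorem keys_foldA (P : List (String × String)) (d : PySem.Dict String (List String)) :
    (foldA P d).keys = PySem.Set.update d.keys (P.map (·.1)) :=
  PySem.Dict.keys_foldl_modify_key P (·.1) _ _ d

-- Set.update by elements already present is the identity
theorem set_update_of_subset (s : List String) (l : List String) (h : ∀ a ∈ l, a ∈ s) :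
    PySem.Set.update s l = s := by
  rw [PySem.Set.update_eq_append_filter]
  have hf : (PySem.Set.ofList l).filter (fun y => !(PySem.Set.contains s y)) = [] := by
    rw [List.filter_eq_nil_iff]
    intro a ha
    have : a ∈ s := h a (by simpa [PySem.Set.mem_ofList] using ha)
    simpa using (PySem.Set.contains_iff s a).mpr this
  rw [hf, List.append_nil]

-- ===== VERDICT (by name: the statement is the Claim_ definition above) =====
theorem parse_spec : Claim_equal_parse := by
  intro lines _
  unfold Spec_parse
  rw [parse_eq_folds, parse_alt_eq]
  set P := lines.map normLine with hP
  set d0 := foldA P PySem.Dict.empty with hd0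
  set dA := d0.items.foldl (fun d p => d.insert p.1 (sortS p.2)) d0 with hdA
  set dB0 := P.foldl (fun d p => d.setdefault p.1 ([] : List String)) PySem.Dict.empty with hdB0
  set dB2 := (PySem.List.sorted P (fun p => p.2)).foldl
      (fun d p => d.modify p.1 [] (· ++ [p.2])) dB0 with hdB2
  -- keys
  have hk0 : d0.keys = PySem.Set.ofList (P.map (·.1)) := by
    rw [hd0, keys_foldA, PySem.Dict.keys_empty]
    exact PySem.Set.update_empty _
  have hnd0 : d0.keys.Nodup := by rw [hk0]; exact PySem.Set.nodup_ofList _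
  have hkB0 : dB0.keys = d0.keys := by
    rw [hdB0, keys_foldl_setdefault, PySem.Dict.keys_empty, hk0]
    exact PySem.Set.update_empty _
  have hkB2 : dB2.keys = d0.keys := by
    rw [hdB2]
    have hk : (List.foldl (fun d p => d.modify p.1 [] (· ++ [p.2])) dB0
        (PySem.List.sorted P (fun p => p.2))).keys
        = PySem.Set.update dB0.keys ((PySem.List.sorted P (fun p => p.2)).map
            (fun p : String × String => p.1)) :=
      PySem.Dict.keys_foldl_modify_key _ (fun p : String × String => p.1) _ _ dB0
    rw [hk, hkB0, hk0]
    refine set_update_of_subset _ _ (fun a ha => ?_)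
    rcases List.mem_map.mp ha with ⟨p, hp, rfl⟩
    exact (PySem.Set.mem_ofList _ _).mpr
      (List.mem_map.mpr ⟨p, (PySem.List.mem_sorted _ _ _ _).mp hp, rfl⟩)
  have hkA : dA.keys = d0.keys := by
    rw [hdA, PySem.Dict.keys_foldl_insert_key d0.items (·.1) _ d0]
    have hik : d0.items.map (·.1) = d0.keys := rfl
    rw [hik]
    exact set_update_of_subset _ _ (fun a ha => ha)
  have hndA : dA.keys.Nodup := by rw [hkA]; exact hnd0
  have hndB : dB2.keys.Nodup := by rw [hkB2]; exact hnd0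
  -- values
  have hBg : ∀ c, dB2.getD c [] = sortS (d0.getD c []) := by
    intro c
    rw [hdB2, PySem.Dict.getD_foldl_modify_append, hdB0, getD_foldl_setdefault,
      PySem.Dict.getD_empty, filter_sorted_snd, map_snd_sorted]
    rw [hd0]
    simp only [foldA]
    rw [PySem.Dict.getD_foldl_modify_append, PySem.Dict.getD_empty]
    rfl
  have hAg : ∀ c, c ∈ d0.keys → dA.getD c [] = sortS (d0.getD c []) := by
    intro c hc
    have hcont : d0.contains c = true := (PySem.Dict.contains_iff_mem_keys _ _).mpr hc
    have hsome : (d0.get? c).isSome := by rw [← PySem.Dict.contains_eq_isSome_get?]; exact hcont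
    obtain ⟨v, hv⟩ := Option.isSome_iff_exists.mp hsome
    have hgd : d0.getD c [] = v := PySem.Dict.getD_of_get?_eq_some _ _ hv
    have hmem : (c, v) ∈ d0.items := PySem.Dict.mem_items_of_get?_eq_some _ hv
    have hndi : (d0.items.map (·.1)).Nodup := by
      simpa only [PySem.Dict.keys] using hnd0
    rw [hdA, getD_foldl_insert_of_mem sortS d0.items d0 c v hndi hmem, hgd]
  -- items = keys.map (k, getD k [])
  rw [PySem.Dict.items_eq_map_keys dA hndA [], PySem.Dict.items_eq_map_keys dB2 hndB [],
    hkA, hkB2]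
  exact List.map_congr_left (fun k hk => by rw [hAg k hk, hBg k])
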